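-- pv_equiv track=rewrite | github.com/gabbychoi43/PythonExercise | ETC/LineTest5.py | solution
-- ===== SOURCE A (Python) =====
-- def solution(dataSource, tags):
--     datas = {}
--     for i in dataSource:
--         datas[i[0]] = {}
--         datas[i[0]]['list'] = i[1:]
--         datas[i[0]]['tags'] = 0
--         for j in tags:
--             if j in datas[i[0]]['list']:
--                 datas[i[0]]['tags'] += 1
--
--     result = []
--     for key in datas:
--         if datas[key]['tags'] != 0:
--             result.append(key)
--
--     result = sorted(result, key=lambda result: datas[result]['tags'], reverse=True)
--
--     return result
-- ===== SOURCE B (Python) =====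
-- def solution(dataSource, tags):
--     # one pass: id -> number of tags appearing in the rest of its row
--     counts = {}
--     for row in dataSource:
--         rest = row[1:]
--         counts[row[0]] = sum(1 for t in tags if t in rest)
--     # gather ids by count, highest count first (stable: dict insertion order)
--     out = []
--     for c in range(len(tags), 0, -1):
--         for key, n in counts.items():
--             if n == c:
--                 out.append(key)
--     return out
-- ===== Notes on version B (the rewrite author's own statement) =====
-- stated objective: alternative
-- what changed: Replaces the key-based comparison sort over a nested dict with a flat id->count map plus a distribution pass that emits ids bucket-by-bucket from count len(tags) down to 1, reproducing the stable descending order without sorting.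
import Mathlib
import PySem

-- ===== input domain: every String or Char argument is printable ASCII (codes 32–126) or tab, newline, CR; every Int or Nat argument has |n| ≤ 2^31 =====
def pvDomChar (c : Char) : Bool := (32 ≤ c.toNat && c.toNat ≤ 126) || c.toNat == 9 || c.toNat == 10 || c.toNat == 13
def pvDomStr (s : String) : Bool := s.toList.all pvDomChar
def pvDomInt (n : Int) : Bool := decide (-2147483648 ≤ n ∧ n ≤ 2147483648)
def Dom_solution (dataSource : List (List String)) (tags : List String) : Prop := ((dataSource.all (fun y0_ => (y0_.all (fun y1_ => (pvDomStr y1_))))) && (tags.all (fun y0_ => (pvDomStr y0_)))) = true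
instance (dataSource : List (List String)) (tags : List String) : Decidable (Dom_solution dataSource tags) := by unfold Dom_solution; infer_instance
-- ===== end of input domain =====

-- B replaces A's comparison sort over a nested dict by a flat id->count map and a
-- distribution pass emitting ids bucket-by-bucket from count len(tags) down to 1 (no speed claim).

-- ===== PORT A =====
-- datas : id -> {'list': row[1:], 'tags': count}; the inner two-field dict is ported as the pair (list, tags).
def buildDatas (dataSource : List (List String)) (tags : List String) :
    PySem.Dict String (List String × Int) :=
  dataSource.foldl (fun d i =>
    d.insert ((PySem.List.pyGet? i 0).getD "")        -- i[0]; Pre_ excludes empty rows, where Python raises IndexError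
      (PySem.List.slice i (some 1) none,              -- i[1:]
       tags.foldl (fun c j => if j ∈ PySem.List.slice i (some 1) none then c + 1 else c) (0 : Int)))
    PySem.Dict.empty

def solution (dataSource : List (List String)) (tags : List String) : List String :=
  let datas := buildDatas dataSource tags
  let result := datas.keys.foldl
    (fun acc key => if (datas.getD key ([], 0)).2 ≠ 0 then acc ++ [key] else acc) []
  PySem.List.sorted result (fun k => (datas.getD k ([], 0)).2) true

-- ===== PORT B =====
def buildCounts (dataSource : List (List String)) (tags : List String) :
    PySem.Dict String Int :=
  dataSource.foldl (fun d row =>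
    d.insert ((PySem.List.pyGet? row 0).getD "")      -- row[0]; Pre_ excludes empty rows
      (tags.foldl (fun s t => if t ∈ PySem.List.slice row (some 1) none then s + 1 else s) (0 : Int)))
    PySem.Dict.empty

def solution_alt (dataSource : List (List String)) (tags : List String) : List String :=
  let counts := buildCounts dataSource tags
  (PySem.List.pyRange (tags.length : Int) 0 (-1)).foldl (fun out c =>
    counts.items.foldl (fun out kv => if kv.2 == c then out ++ [kv.1] else out) out) []

-- ===== PRECONDITION & SPEC =====
-- Pre_ excludes exactly the inputs with an empty row, on which A's i[0] raises IndexError (B raises there too).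
def Pre_solution (dataSource : List (List String)) (tags : List String) : Prop :=
  ∀ r ∈ dataSource, r ≠ []
instance (dataSource : List (List String)) (tags : List String) : Decidable (Pre_solution dataSource tags) := by unfold Pre_solution; infer_instance

def pvWitness_solution : List (List String) × List String :=
  ([["a", "x", "y"], ["b", "y"], ["c", "q"]], ["x", "y"])

def Spec_solution (dataSource : List (List String)) (tags : List String) (out : List String) : Prop := out = solution_alt dataSource tags
instance (dataSource : List (List String)) (tags : List String) (out : List String) : Decidable (Spec_solution dataSource tags out) := by unfold Spec_solution; infer_instance

-- ===== CLAIM (what is proved, stated in full; the proofs are below) =====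
def Claim_equal_solution : Prop := ∀ (dataSource : List (List String)) (tags : List String), Dom_solution dataSource tags → Pre_solution dataSource tags → Spec_solution dataSource tags (solution dataSource tags)

-- ===== LEMMAS AND PROOFS =====

theorem insertBy_nil {α : Type} (before : α → α → Bool) (x : α) :
    PySem.List.insertBy before x [] = [x] := rfl

theorem insertBy_cons {α : Type} (before : α → α → Bool) (x y : α) (l : List α) :
    PySem.List.insertBy before x (y :: l)
      = if before x y then x :: y :: l else y :: PySem.List.insertBy before x l := rfl

-- insertBy passes over a block it does not insert before
theorem insertBy_append_of_not_before {α : Type} (before : α → α → Bool) (x : α)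
    (ys zs : List α) (h : ∀ y ∈ ys, before x y = false) :
    PySem.List.insertBy before x (ys ++ zs) = ys ++ PySem.List.insertBy before x zs := by
  induction ys with
  | nil => simp
  | cons y ys ih =>
    have hy : before x y = false := h y (by simp)
    simp only [List.cons_append, insertBy_cons, hy, Bool.false_eq_true, if_false]
    rw [ih (fun y hyy => h y (by simp [hyy]))]

-- insertBy puts x in front when it goes before everything
theorem insertBy_cons_of_all_before {α : Type} (before : α → α → Bool) (x : α)
    (zs : List α) (h : ∀ y ∈ zs, before x y = true) :
    PySem.List.insertBy before x zs = x :: zs := by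
  cases zs with
  | nil => simp [insertBy_nil]
  | cons z zs' => simp [PySem.List.insertBy, h z (by simp)]

-- inserting one element into the bucket decomposition appends it to its own bucket
theorem insert_buckets {α : Type} (g : α → Int) (x : α) (cs : List Int)
    (hcs : cs.Pairwise (· > ·)) (hx : g x ∈ cs) (xs : List α) :
    PySem.List.insertBy (fun a b => decide (g b < g a)) x
        (cs.flatMap (fun c => xs.filter (fun y => g y == c)))
      = cs.flatMap (fun c => (xs ++ [x]).filter (fun y => g y == c)) := by
  induction cs with
  | nil => simp at hx
  | cons c cs ih =>
    have hhead : ∀ c' ∈ cs, c' < c := by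
      intro c' hc'; exact (List.pairwise_cons.mp hcs).1 c' hc'
    have htail : cs.Pairwise (· > ·) := (List.pairwise_cons.mp hcs).2
    have hnotbef : ∀ y ∈ xs.filter (fun y => g y == c), (fun a b => decide (g b < g a)) x y = false := by
      intro y hy
      have := (List.mem_filter.mp hy).2
      have hgy : g y = c := by simpa using this
      by_cases hgc : g x = c
      · simp [hgy, hgc]
      · have hgx : g x ∈ cs := by
          rcases List.mem_cons.mp hx with h | h
          · exact absurd h hgc
          · exact h
        have : g x < c := hhead _ hgx
        simp [hgy]; omega
    by_cases hgc : g x = c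
    · -- x belongs to the head bucket: it goes after that bucket, before all later ones
      simp only [List.flatMap_cons]
      rw [insertBy_append_of_not_before _ _ _ _ hnotbef]
      have hall : ∀ y ∈ cs.flatMap (fun c => xs.filter (fun y => g y == c)),
          (fun a b => decide (g b < g a)) x y = true := by
        intro y hy
        rcases List.mem_flatMap.mp hy with ⟨c', hc', hyf⟩
        have hgy : g y = c' := by simpa using (List.mem_filter.mp hyf).2
        have : c' < c := hhead _ hc'
        simp [hgy, hgc]; omega
      rw [insertBy_cons_of_all_before _ _ _ hall]
      have hb1 : (xs ++ [x]).filter (fun y => g y == c) = xs.filter (fun y => g y == c) ++ [x] := by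
        simp [List.filter_append, hgc]
      have hb2 : cs.flatMap (fun c => (xs ++ [x]).filter (fun y => g y == c))
          = cs.flatMap (fun c => xs.filter (fun y => g y == c)) := by
        apply List.flatMap_congr
        intro c' hc'
        have hne : ¬ (g x = c') := by have := hhead _ hc'; omega
        simp [List.filter_append, hne]
      rw [hb1, hb2]; simp
    · -- x belongs to a later bucket
      have hgx : g x ∈ cs := by
        rcases List.mem_cons.mp hx with h | h
        · exact absurd h hgc
        · exact h
      simp only [List.flatMap_cons]
      rw [insertBy_append_of_not_before _ _ _ _ hnotbef]
      rw [ih htail hgx]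
      have hb : (xs ++ [x]).filter (fun y => g y == c) = xs.filter (fun y => g y == c) := by
        simp [List.filter_append, hgc]
      rw [hb]

-- Python's stable descending sort IS the bucket decomposition along a strictly decreasing value list
theorem sorted_rev_eq_buckets {α : Type} (g : α → Int) (cs : List Int)
    (hcs : cs.Pairwise (· > ·)) (xs : List α) (hmem : ∀ x ∈ xs, g x ∈ cs) :
    PySem.List.sorted xs g true = cs.flatMap (fun c => xs.filter (fun y => g y == c)) := by
  rw [PySem.List.sorted_rev_eq_foldl_insertBy]
  induction xs using List.reverseRecOn with
  | nil => simp
  | append_singleton xs x ih =>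
    rw [List.foldl_append]
    simp only [List.foldl_cons, List.foldl_nil]
    rw [ih (fun y hy => hmem y (by simp [hy]))]
    exact insert_buckets g x cs hcs (hmem x (by simp)) xs

-- the two build loops produce item lists related by dropping the stored row tail
theorem items_buildCounts (dataSource : List (List String)) (tags : List String) :
    (buildCounts dataSource tags).items
      = (buildDatas dataSource tags).items.map (fun p => (p.1, p.2.2)) := by
  unfold buildCounts buildDatas
  suffices h : ∀ (ds : List (List String)) (d1 : PySem.Dict String (List String × Int))
      (d2 : PySem.Dict String Int), d2.items = d1.items.map (fun p => (p.1, p.2.2)) →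
      (ds.foldl (fun d row => d.insert ((PySem.List.pyGet? row 0).getD "")
          (tags.foldl (fun s t => if t ∈ PySem.List.slice row (some 1) none then s + 1 else s) (0 : Int))) d2).items
        = (ds.foldl (fun d i => d.insert ((PySem.List.pyGet? i 0).getD "")
          (PySem.List.slice i (some 1) none,
           tags.foldl (fun c j => if j ∈ PySem.List.slice i (some 1) none then c + 1 else c) (0 : Int))) d1).items.map (fun p => (p.1, p.2.2)) by
    exact h dataSource PySem.Dict.empty PySem.Dict.empty (by simp [PySem.Dict.empty])
  intro ds
  induction ds with
  | nil => intro d1 d2 h; simpa using h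
  | cons row ds ih =>
    intro d1 d2 h
    simp only [List.foldl_cons]
    apply ih
    -- one insert step preserves the relation
    have hkeys : d2.keys = d1.keys := by
      show d2.items.map Prod.fst = d1.items.map Prod.fst
      rw [h, List.map_map]; rfl
    have hcont : ∀ k : String, d2.contains k = d1.contains k := by
      intro k
      rw [PySem.Dict.contains_eq_decide_mem_keys, PySem.Dict.contains_eq_decide_mem_keys, hkeys]
    rw [PySem.Dict.items_insert, PySem.Dict.items_insert, hcont]
    by_cases hc : d1.contains ((PySem.List.pyGet? row 0).getD "") = true
    · simp only [hc, if_true, h, List.map_map]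
      apply List.map_congr_left
      intro p _
      by_cases hp : (p.1 == (PySem.List.pyGet? row 0).getD "") = true <;>
        simp [Function.comp, hp]
    · rw [if_neg hc, if_neg hc, h, List.map_append]
      rfl

-- every stored count lies between 0 and len(tags)
theorem count_foldl_bounds (tags : List String) (lst : List String) :
    0 ≤ tags.foldl (fun c j => if j ∈ lst then c + 1 else c) (0 : Int)
      ∧ tags.foldl (fun c j => if j ∈ lst then c + 1 else c) (0 : Int) ≤ tags.length := by
  suffices h : ∀ (ts : List String) (c0 : Int),
      c0 ≤ ts.foldl (fun c j => if j ∈ lst then c + 1 else c) c0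
        ∧ ts.foldl (fun c j => if j ∈ lst then c + 1 else c) c0 ≤ c0 + ts.length by
    have := h tags 0; constructor <;> [exact this.1; simpa using this.2]
  intro ts
  induction ts with
  | nil => intro c0; simp
  | cons t ts ih =>
    intro c0
    simp only [List.foldl_cons, List.length_cons]
    by_cases ht : t ∈ lst
    · have := ih (c0 + 1); simp only [ht, if_true] at *; push_cast; constructor <;> omega
    · have := ih c0; simp only [ht, if_false] at *; push_cast; constructor <;> omega

theorem datas_values_bounds (dataSource : List (List String)) (tags : List String) :
    ∀ p ∈ (buildDatas dataSource tags).items, 0 ≤ p.2.2 ∧ p.2.2 ≤ tags.length := by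
  unfold buildDatas
  suffices h : ∀ (ds : List (List String)) (d : PySem.Dict String (List String × Int)),
      (∀ p ∈ d.items, 0 ≤ p.2.2 ∧ p.2.2 ≤ tags.length) →
      ∀ p ∈ (ds.foldl (fun d i => d.insert ((PySem.List.pyGet? i 0).getD "")
          (PySem.List.slice i (some 1) none,
           tags.foldl (fun c j => if j ∈ PySem.List.slice i (some 1) none then c + 1 else c) (0 : Int))) d).items,
        0 ≤ p.2.2 ∧ p.2.2 ≤ tags.length by
    exact h dataSource PySem.Dict.empty (by simp [PySem.Dict.empty])
  intro ds
  induction ds with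
  | nil => intro d h; exact h
  | cons row ds ih =>
    intro d h
    simp only [List.foldl_cons]
    apply ih
    intro p hp
    rcases (PySem.Dict.mem_items_insert _ _ _ _).mp hp with hnew | ⟨hold, _⟩
    · subst hnew; exact count_foldl_bounds tags _
    · exact h p hold

theorem nodup_keys_buildDatas (dataSource : List (List String)) (tags : List String) :
    (buildDatas dataSource tags).keys.Nodup := by
  unfold buildDatas
  exact PySem.Dict.nodup_keys_foldl_insert_key dataSource
    (fun i => (PySem.List.pyGet? i 0).getD "")
    (fun d i => (PySem.List.slice i (some 1) none,
       tags.foldl (fun c j => if j ∈ PySem.List.slice i (some 1) none then c + 1 else c) (0 : Int)))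
    PySem.Dict.empty (by simp [PySem.Dict.empty, PySem.Dict.keys])

-- ===== VERDICT (by name: the statement is the Claim_ definition above) =====
theorem solution_spec : Claim_equal_solution := by
  intro ds tags _ _
  unfold Spec_solution solution solution_alt
  simp only [items_buildCounts]
  have hnd : ((buildDatas ds tags).keys).Nodup := nodup_keys_buildDatas ds tags
  have hgetD : ∀ p ∈ (buildDatas ds tags).items, (buildDatas ds tags).getD p.1 ([], 0) = p.2 := by
    intro p hp
    exact PySem.Dict.getD_of_mem_items _ (show (p.1, p.2) ∈ _ by simpa using hp) hnd _
  have hbnd := datas_values_bounds ds tags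
  -- the value list n, n-1, …, 1 is strictly decreasing
  have hcs : (PySem.List.pyRange (tags.length : Int) 0 (-1)).Pairwise (· > ·) := by
    rw [PySem.List.pyRange_neg_one_eq_reverse]
    exact List.pairwise_reverse.mpr (PySem.List.pairwise_lt_pyRange_one 1 ((tags.length : Int) + 1))
  -- A's filtered key list, characterised through the items
  have hres : (buildDatas ds tags).keys.foldl
      (fun acc key => if ((buildDatas ds tags).getD key ([], 0)).2 ≠ 0 then acc ++ [key] else acc) []
      = ((buildDatas ds tags).items.filter (fun p => decide (p.2.2 ≠ 0))).map Prod.fst := by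
    rw [PySem.List.foldl_append_ite_eq_filter
      (fun key => ((buildDatas ds tags).getD key ([], 0)).2 ≠ 0), List.nil_append]
    show List.filter _ ((buildDatas ds tags).items.map Prod.fst) = _
    rw [List.filter_map]
    congr 1
    apply List.filter_congr
    intro p hp
    simp [Function.comp, hgetD p hp]
  rw [hres]
  -- B's distribution loop is the bucket decomposition
  have hinner : ∀ (acc : List String) (c : Int), c ∈ PySem.List.pyRange (tags.length : Int) 0 (-1) →
      ((buildDatas ds tags).items.map (fun p => (p.1, p.2.2))).foldl
          (fun out kv => if kv.2 == c then out ++ [kv.1] else out) acc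
        = acc ++ (((buildDatas ds tags).items.map (fun p => (p.1, p.2.2))).filter
            (fun kv => kv.2 == c)).map Prod.fst := by
    intro acc c _
    exact PySem.List.foldl_append_if (fun kv => kv.2 == c) Prod.fst _ acc
  rw [PySem.List.foldl_congr_mem _ _ _ _ hinner, PySem.List.foldl_append_eq_flatMap, List.nil_append]
  -- sort = buckets
  rw [sorted_rev_eq_buckets (fun k => ((buildDatas ds tags).getD k ([], 0)).2)
      (PySem.List.pyRange (tags.length : Int) 0 (-1)) hcs _ ?_]
  · -- bucket-by-bucket equality
    apply List.flatMap_congr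
    intro c hc
    have hcpos : 0 < c := (PySem.List.mem_pyRange_neg_one.mp hc).1
    have hR : List.filter (fun kv => kv.2 == c) (List.map (fun p => (p.1, p.2.2)) (buildDatas ds tags).items)
        = List.map (fun p => ((p.1, p.2.2) : String × Int)) (List.filter (fun p => p.2.2 == c) (buildDatas ds tags).items) :=
      List.filter_map
    rw [hR, List.map_map]
    have hfst : (Prod.fst ∘ fun p => ((p.1, p.2.2) : String × Int))
        = (Prod.fst : (String × (List String × Int)) → String) := rfl
    rw [hfst, List.filter_map, List.filter_filter]
    congr 1
    apply List.filter_congr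
    intro p hp
    simp only [Function.comp_apply, hgetD p hp]
    by_cases h : p.2.2 = c
    · simp only [h]
      simp
      omega
    · simp [h]
  · -- every filtered key's count lies in 1..len(tags)
    intro x hx
    rcases List.mem_map.mp hx with ⟨p, hpf, hpx⟩
    have hpm := (List.mem_filter.mp hpf).1
    have hpne : p.2.2 ≠ 0 := by simpa using (List.mem_filter.mp hpf).2
    have hb := hbnd p hpm
    rw [← hpx]
    simp only [PySem.List.mem_pyRange_neg_one, hgetD p hpm]
    omega
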